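-- pv_equiv track=rewrite | github.com/FatimaKssayrawi/FatimaKssayrawiMidterm | main.py | count_gender_employees
-- ===== SOURCE A (Python) =====
-- def count_gender_employees(employee_dict):
--     count_male = 0
--     count_female = 0
--     for emp_id, emp_info in employee_dict.items():
--         if emp_info['gender'] == 'male':
--             count_male += 1
--         else:
--             count_female += 1
--     return count_male, count_female
-- ===== SOURCE B (Python) =====
-- def count_gender_employees(employee_dict):
--     # Divide-and-conquer: split the record list in half, count each half
--     # recursively, combine by adding the pairs (depth O(log n), no deep recursion).
--     def go(items):
--         n = len(items)
--         if n == 0: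
--             return 0, 0
--         if n == 1:
--             return (1, 0) if items[0]['gender'] == 'male' else (0, 1)
--         mid = n // 2
--         m1, f1 = go(items[:mid])
--         m2, f2 = go(items[mid:])
--         return m1 + m2, f1 + f2
--     return go(list(employee_dict.values()))
-- ===== Notes on version B (the rewrite author's own statement) =====
-- stated objective: alternative
-- what changed: B replaces A's single loop with two branch-incremented counters by a divide-and-conquer recursion: it splits the list of records in half, counts each half recursively (base case: one record), and combines the two (male,female) pairs by addition.
import Mathlib
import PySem

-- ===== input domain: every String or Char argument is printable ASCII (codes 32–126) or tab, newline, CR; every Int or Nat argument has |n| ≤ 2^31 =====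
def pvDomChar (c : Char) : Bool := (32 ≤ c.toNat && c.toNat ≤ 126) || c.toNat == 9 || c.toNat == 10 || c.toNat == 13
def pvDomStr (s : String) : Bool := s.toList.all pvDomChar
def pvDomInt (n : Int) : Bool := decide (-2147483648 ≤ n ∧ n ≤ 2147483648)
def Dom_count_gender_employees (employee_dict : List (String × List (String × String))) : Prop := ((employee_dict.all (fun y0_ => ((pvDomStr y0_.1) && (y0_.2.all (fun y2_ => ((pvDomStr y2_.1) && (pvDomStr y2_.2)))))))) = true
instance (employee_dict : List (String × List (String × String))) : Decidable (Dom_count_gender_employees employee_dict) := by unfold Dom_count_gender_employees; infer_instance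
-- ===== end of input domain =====

-- B replaces A's single two-counter loop with a divide-and-conquer recursion over the record list; same values, alternative algorithm.


-- ===== PORT A =====
-- A's loop over .items() with two counters; emp_info['gender'] raises KeyError when the
-- key is missing — Pre_ excludes exactly those inputs, so the 'none' branch is unreachable there.
def count_gender_employees (employee_dict : List (String × List (String × String))) : Int × Int :=
  employee_dict.foldl
    (fun (c : Int × Int) kv =>
      match PySem.Dict.get? (PySem.Dict.mk kv.2) "gender" with
      | some g => if g == "male" then (c.1 + 1, c.2) else (c.1, c.2 + 1)
      | none => c)  -- unreachable under Pre_ (Python raises KeyError here)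
    (0, 0)

-- ===== PORT B =====
-- Source B's inner go: divide and conquer on the list of records. n, mid are nonnegative Python ints,
-- so len/ // 2 are ported as Nat length / Nat division, and items[:mid] / items[mid:] with
-- 0 ≤ mid ≤ n are exactly List.take mid / List.drop mid.
def cge_go (items : List (List (String × String))) : Int × Int :=
  let n := items.length
  if n = 0 then (0, 0)
  else if n = 1 then
    match items.head? with
    | some info =>
      match PySem.Dict.get? (PySem.Dict.mk info) "gender" with
      | some g => if g == "male" then ((1 : Int), (0 : Int)) else (0, 1)
      | none => (0, 0)  -- unreachable under Pre_ (Python raises KeyError here)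
    | none => (0, 0)  -- unreachable: n = 1
  else
    let mid := n / 2
    let l := cge_go (items.take mid)
    let r := cge_go (items.drop mid)
    (l.1 + r.1, l.2 + r.2)
termination_by items.length
decreasing_by
  · simp only [List.length_take]; omega
  · simp only [List.length_drop]; omega

def count_gender_employees_alt (employee_dict : List (String × List (String × String))) : Int × Int :=
  cge_go (employee_dict.map Prod.snd)

-- ===== PRECONDITION & SPEC =====
-- Pre_ excludes only inputs where some employee record lacks a 'gender' key: both Pythons raise KeyError there.
def Pre_count_gender_employees (employee_dict : List (String × List (String × String))) : Prop :=
  ∀ kv ∈ employee_dict, (PySem.Dict.get? (PySem.Dict.mk kv.2) "gender").isSome = true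
instance (employee_dict : List (String × List (String × String))) : Decidable (Pre_count_gender_employees employee_dict) := by unfold Pre_count_gender_employees; infer_instance

def pvWitness_count_gender_employees : (List (String × List (String × String))) :=
  [("1", [("gender", "male")]), ("2", [("gender", "female")])]

def Spec_count_gender_employees (employee_dict : List (String × List (String × String))) (out : Int × Int) : Prop := out = count_gender_employees_alt employee_dict
instance (employee_dict : List (String × List (String × String))) (out : Int × Int) : Decidable (Spec_count_gender_employees employee_dict out) := by unfold Spec_count_gender_employees; infer_instance

-- ===== CLAIM =====
def Claim_equal_count_gender_employees : Prop := ∀ (employee_dict : List (String × List (String × String))), Dom_count_gender_employees employee_dict → Pre_count_gender_employees employee_dict → Spec_count_gender_employees employee_dict (count_gender_employees employee_dict)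

-- ===== LEMMAS AND PROOFS =====
def pvIsMale (info : List (String × String)) : Bool :=
  PySem.Dict.get? (PySem.Dict.mk info) "gender" == some "male"

-- characterisation of B's divide-and-conquer under the key-present hypothesis
theorem cge_go_eq (items : List (List (String × String)))
    (h : ∀ info ∈ items, (PySem.Dict.get? (PySem.Dict.mk info) "gender").isSome = true) :
    cge_go items = ((((items.countP pvIsMale : Nat)) : Int), ((items.length : Int) - ((items.countP pvIsMale : Nat) : Int))) := by
  induction items using cge_go.induct with
  | case1 items n hn =>
    have : items = [] := List.length_eq_zero_iff.mp hn
    subst this; simp [cge_go]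
  | case2 items n hn h1 info hh g hg hm =>
    have hlen1 : items.length = 1 := h1
    have hl : items = [info] := by
      cases items with
      | nil => simp at hh
      | cons a tl =>
        simp only [List.head?_cons, Option.some.injEq] at hh
        cases tl with
        | nil => rw [hh]
        | cons b tl2 => simp at hlen1
    subst hl
    rw [cge_go]
    simp [hg, hm, pvIsMale]
  | case3 items n hn h1 info hh g hg hm =>
    have hlen1 : items.length = 1 := h1
    have hl : items = [info] := by
      cases items with
      | nil => simp at hh
      | cons a tl =>
        simp only [List.head?_cons, Option.some.injEq] at hh
        cases tl with
        | nil => rw [hh]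
        | cons b tl2 => simp at hlen1
    subst hl
    rw [cge_go]
    simp [hg, hm, pvIsMale]
  | case4 items n hn h1 info hh hg =>
    exfalso
    have hmem : info ∈ items := by
      cases items with
      | nil => simp at hh
      | cons a tl =>
        simp only [List.head?_cons, Option.some.injEq] at hh
        rw [← hh]; exact List.mem_cons_self ..
    have := h info hmem
    rw [show PySem.Dict.get? (PySem.Dict.mk info) "gender" = none from hg] at this
    simp at this
  | case5 items n hn h1 hh =>
    exfalso
    cases items with
    | nil => exact hn rfl
    | cons a tl => simp at hh
  | case6 items n hn h1 mid ih1 ih2 =>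
    have hn' : ¬ items.length = 0 := hn
    have h1' : ¬ items.length = 1 := h1
    have ht : ∀ info ∈ items.take (items.length / 2), (PySem.Dict.get? (PySem.Dict.mk info) "gender").isSome = true :=
      fun i hi => h i (List.mem_of_mem_take hi)
    have hd : ∀ info ∈ items.drop (items.length / 2), (PySem.Dict.get? (PySem.Dict.mk info) "gender").isSome = true :=
      fun i hi => h i (List.mem_of_mem_drop hi)
    have ih1' : cge_go (items.take (items.length / 2))
        = ((((items.take (items.length / 2)).countP pvIsMale : Nat) : Int),
           ((items.take (items.length / 2)).length : Int) - ((items.take (items.length / 2)).countP pvIsMale : Nat)) := ih1 ht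
    have ih2' : cge_go (items.drop (items.length / 2))
        = ((((items.drop (items.length / 2)).countP pvIsMale : Nat) : Int),
           ((items.drop (items.length / 2)).length : Int) - ((items.drop (items.length / 2)).countP pvIsMale : Nat)) := ih2 hd
    have hcount : (items.take (items.length / 2)).countP pvIsMale + (items.drop (items.length / 2)).countP pvIsMale
        = items.countP pvIsMale := by
      conv_rhs => rw [← List.take_append_drop (items.length / 2) items]
      rw [List.countP_append]
    have hlen : (items.take (items.length / 2)).length + (items.drop (items.length / 2)).length = items.length := by
      rw [List.length_take, List.length_drop]; omega
    rw [cge_go]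
    dsimp only
    rw [if_neg hn', if_neg h1', ih1', ih2']
    refine Prod.ext ?_ ?_ <;> dsimp only <;> omega

-- characterisation of A's fold
theorem cge_fold_eq (l : List (String × List (String × String)))
    (h : ∀ kv ∈ l, (PySem.Dict.get? (PySem.Dict.mk kv.2) "gender").isSome = true)
    (a b : Int) :
    l.foldl
      (fun (c : Int × Int) kv =>
        match PySem.Dict.get? (PySem.Dict.mk kv.2) "gender" with
        | some g => if g == "male" then (c.1 + 1, c.2) else (c.1, c.2 + 1)
        | none => c)
      (a, b)
    = (a + (((l.map Prod.snd).countP pvIsMale : Nat) : Int),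
       b + ((l.length : Int) - ((l.map Prod.snd).countP pvIsMale : Nat))) := by
  induction l generalizing a b with
  | nil => simp
  | cons kv tl ih =>
    have hkv := h kv (List.mem_cons_self ..)
    have htl : ∀ p ∈ tl, (PySem.Dict.get? (PySem.Dict.mk p.2) "gender").isSome = true :=
      fun p hp => h p (List.mem_cons_of_mem _ hp)
    obtain ⟨g, hg⟩ := Option.isSome_iff_exists.mp hkv
    simp only [List.foldl_cons, List.map_cons, List.countP_cons, List.length_cons, hg, pvIsMale]
    by_cases hm : g = "male"
    · simp only [hm, beq_self_eq_true, if_true, ih htl]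
      refine Prod.ext ?_ ?_ <;> (simp; try ring)
    · have hb : (g == "male") = false := beq_eq_false_iff_ne.mpr hm
      simp only [hb, ih htl]
      refine Prod.ext ?_ ?_ <;> (simp [hb]; try ring)

-- ===== VERDICT =====
theorem count_gender_employees_spec : Claim_equal_count_gender_employees := by
  intro d _ hpre
  unfold Spec_count_gender_employees count_gender_employees count_gender_employees_alt
  rw [cge_fold_eq d hpre 0 0,
      cge_go_eq (d.map Prod.snd) (by intro i hi; obtain ⟨kv, hkv, rfl⟩ := List.mem_map.mp hi; exact hpre kv hkv)]
  simp
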